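-- pv_equiv track=rewrite | github.com/rayaneweb/puissance4 | ia_engine.py | board_to_moves
-- ===== SOURCE A (Python) =====
-- EMPTY = "."
--
-- RED = "R"
--
-- def board_to_moves(board: list, starting_player: str = RED) -> list:
--     rows = len(board)
--     cols = len(board[0])
--     work = [row[:] for row in board]
--     moves_rev = []
--
--     while True:
--         found = False
--         for c in range(cols):
--             for r in range(rows):
--                 if work[r][c] != EMPTY:
--                     moves_rev.append(c)
--                     work[r][c] = EMPTY
--                     found = True
--                     break
--         if not found:
--             break
--
--     return list(reversed(moves_rev))
-- ===== SOURCE B (Python) =====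
-- EMPTY = "."
--
-- RED = "R"
--
-- def board_to_moves(board: list, starting_player: str = RED) -> list:
--     rows = len(board)
--     cols = len(board[0])
--     heights = [sum(1 for r in range(rows) if board[r][c] != EMPTY) for c in range(cols)]
--     maxh = max(heights, default=0)
--     moves_rev = []
--     for k in range(1, maxh + 1):
--         for c in range(cols):
--             if heights[c] >= k:
--                 moves_rev.append(c)
--     return moves_rev[::-1]
-- ===== Notes on version B (the rewrite author's own statement) =====
-- stated objective: faster
-- what changed: Instead of repeatedly re-scanning and mutating a board copy to peel one piece per column per pass, B counts each column's pieces once and emits the move sequence directly from those heights.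
import Mathlib
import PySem

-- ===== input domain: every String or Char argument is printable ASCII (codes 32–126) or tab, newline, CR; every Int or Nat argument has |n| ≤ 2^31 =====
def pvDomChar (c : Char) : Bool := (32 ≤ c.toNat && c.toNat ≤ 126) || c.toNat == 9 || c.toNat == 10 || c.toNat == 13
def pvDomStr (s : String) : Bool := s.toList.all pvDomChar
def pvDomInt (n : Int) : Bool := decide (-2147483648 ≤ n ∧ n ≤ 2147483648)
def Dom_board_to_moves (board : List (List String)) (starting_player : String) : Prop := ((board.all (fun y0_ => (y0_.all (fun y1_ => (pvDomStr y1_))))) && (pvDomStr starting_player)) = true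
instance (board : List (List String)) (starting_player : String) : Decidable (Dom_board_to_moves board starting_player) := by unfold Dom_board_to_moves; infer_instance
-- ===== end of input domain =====

-- B replaces A's repeated peel-one-piece-per-column passes over a mutated board copy by counting each
-- column's pieces once and emitting the moves directly from those heights (objective: faster).

-- ===== PORT A =====
-- inner 'for r in range(rows): if work[r][c] != EMPTY: … break': the first row index passing the test
def pvFindRow (rows : Nat) (work : List (List String)) (c : Nat) : Option Nat :=
  (List.range rows).find? (fun r => ((work.getD r []).getD c "." != "."))

-- one 'for c in range(cols)' pass; state = (work, moves_rev, found)
def pvPassA (rows : Nat) : List Nat → List (List String) → List Int → Bool →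
    List (List String) × List Int × Bool
  | [], work, acc, found => (work, acc, found)
  | c :: rest, work, acc, found =>
    match pvFindRow rows work c with
    | some r => pvPassA rows rest (work.set r ((work.getD r []).set c ".")) (acc ++ [(c : Int)]) true
    | none => pvPassA rows rest work acc found

-- the 'while True' loop; fuel rows+1 is only a totality guard: each pass removes one piece from every
-- nonempty column and no column holds more than rows pieces, so at most rows+1 passes ever run
def pvLoopA (rows cols : Nat) : Nat → List (List String) → List Int → List Int
  | 0, _, acc => acc
  | fuel + 1, work, acc =>
    match pvPassA rows (List.range cols) work acc false with
    | (work', acc', f) => if f then pvLoopA rows cols fuel work' acc' else acc'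

def board_to_moves (board : List (List String)) (starting_player : String) : List Int :=
  let rows := board.length
  let cols := (board.headD []).length
  (pvLoopA rows cols (rows + 1) board []).reverse

-- ===== PORT B =====
def board_to_moves_alt (board : List (List String)) (starting_player : String) : List Int :=
  let rows := board.length
  let cols := (board.headD []).length
  let heights : List Nat :=
    (List.range cols).map (fun c =>
      ((List.range rows).filter (fun r => ((board.getD r []).getD c "." != "."))).length)
  let movesRev : List Int :=
    (List.range' 1 rows).foldl (fun res k =>
      (List.range cols).foldl (fun res c =>
        if k ≤ heights.getD c 0 then res ++ [(c : Int)] else res) res) []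
  movesRev.reverse

-- ===== PRECONDITION & SPEC =====
-- Pre_ excludes exactly the inputs where the Python A raises IndexError: the empty board (board[0])
-- and boards in which some row is shorter than the first row (read as work[r][c] on the final full scan).
def Pre_board_to_moves (board : List (List String)) (starting_player : String) : Prop :=
  board ≠ [] ∧ ∀ row ∈ board, (board.headD []).length ≤ row.length
instance (board : List (List String)) (starting_player : String) : Decidable (Pre_board_to_moves board starting_player) := by unfold Pre_board_to_moves; infer_instance

def pvWitness_board_to_moves : List (List String) × String := ([[".", "R"], ["R", "Y"]], "R")

def Spec_board_to_moves (board : List (List String)) (starting_player : String) (out : List Int) : Prop := out = board_to_moves_alt board starting_player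
instance (board : List (List String)) (starting_player : String) (out : List Int) : Decidable (Spec_board_to_moves board starting_player out) := by unfold Spec_board_to_moves; infer_instance

-- ===== CLAIM (what is proved, stated in full; the proofs are below) =====
def Claim_equal_board_to_moves : Prop := ∀ (board : List (List String)) (starting_player : String), Dom_board_to_moves board starting_player → Pre_board_to_moves board starting_player → Spec_board_to_moves board starting_player (board_to_moves board starting_player)

-- ===== LEMMAS AND PROOFS =====

def pvColCnt (rows : Nat) (work : List (List String)) (c : Nat) : Nat :=
  ((List.range rows).filter (fun r => ((work.getD r []).getD c "." != "."))).length

def pvEmitK (cols : Nat) (h : Nat → Nat) (k : Nat) : List Int :=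
  ((List.range cols).filter (fun c => decide (k ≤ h c))).map (fun c => ((c : Nat) : Int))

lemma pv_getD_set_self {α} (l : List α) (i : Nat) (a d : α) (h : i < l.length) :
    (l.set i a).getD i d = a := by simp [List.getD, h]

lemma pv_getD_set_ne {α} (l : List α) (i j : Nat) (a : α) (d : α) (h : i ≠ j) :
    (l.set i a).getD j d = l.getD j d := by simp [List.getD, List.getElem?_set_ne h]

lemma pv_cell_cleared (row : List String) (c : Nat) : ((row.set c ".").getD c ".") = "." := by
  by_cases hc : c < row.length
  · simp [List.getD, hc]
  · rw [List.getD_eq_default]; simp [List.length_set]; omega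

lemma pv_countP_update {l : List Nat} (hnd : l.Nodup) {r : Nat} (hm : r ∈ l)
    {P P' : Nat → Bool} (hr : P r = true) (hr' : P' r = false)
    (hagree : ∀ x ∈ l, x ≠ r → P' x = P x) :
    l.countP P' = l.countP P - 1 := by
  induction l with
  | nil => simp at hm
  | cons a t ih =>
    rcases List.nodup_cons.mp hnd with ⟨hna, hnt⟩
    rcases List.mem_cons.mp hm with h1 | h1
    · subst h1
      have hag : ∀ x ∈ t, P' x = true ↔ P x = true := by
        intro x hx
        rw [hagree x (List.mem_cons_of_mem _ hx) (fun e => hna (e ▸ hx))]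
      rw [List.countP_cons, List.countP_cons, hr, hr', List.countP_congr hag]
      simp
    · have hane : a ≠ r := fun e => hna (e ▸ h1)
      have hcnt : 0 < t.countP P := List.countP_pos_iff.mpr ⟨r, h1, hr⟩
      rw [List.countP_cons, List.countP_cons, hagree a (List.mem_cons_self) hane,
        ih hnt h1 (fun x hx => hagree x (List.mem_cons_of_mem _ hx))]
      omega

lemma pv_row_lt (work : List (List String)) (c r : Nat)
    (hP : ((work.getD r []).getD c "." != ".") = true) : r < work.length := by
  by_contra h
  rw [show work.getD r [] = ([] : List String) from List.getD_eq_default _ _ (by omega)] at hP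
  simp at hP

lemma pvColCnt_set_self (rows : Nat) (work : List (List String)) (c r : Nat)
    (hr : r < rows) (hP : ((work.getD r []).getD c "." != ".") = true) :
    pvColCnt rows (work.set r ((work.getD r []).set c ".")) c = pvColCnt rows work c - 1 := by
  have hrl : r < work.length := pv_row_lt work c r hP
  unfold pvColCnt
  rw [← List.countP_eq_length_filter, ← List.countP_eq_length_filter]
  apply pv_countP_update (List.nodup_range) (List.mem_range.mpr hr) hP
  · rw [pv_getD_set_self _ _ _ _ hrl, pv_cell_cleared]
    simp
  · intro x hx hxr
    rw [pv_getD_set_ne _ _ _ _ _ (fun e => hxr e.symm)]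

lemma pvColCnt_set_ne (rows : Nat) (work : List (List String)) (c c' r : Nat) (hne : c' ≠ c) :
    pvColCnt rows (work.set r ((work.getD r []).set c ".")) c' = pvColCnt rows work c' := by
  unfold pvColCnt
  congr 1
  apply List.filter_congr
  intro x hx
  by_cases hxr : x = r
  · subst hxr
    by_cases hl : x < work.length
    · rw [pv_getD_set_self _ _ _ _ hl, pv_getD_set_ne _ _ _ _ _ (Ne.symm hne)]
    · have h1 : (work.set x ((work.getD x []).set c ".")).getD x [] = ([] : List String) :=
        List.getD_eq_default _ _ (by simp [List.length_set]; omega)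
      have h2 : work.getD x [] = ([] : List String) := List.getD_eq_default _ _ (by omega)
      rw [h1, h2]
  · rw [pv_getD_set_ne _ _ _ _ _ (fun e => hxr e.symm)]

lemma pvFindRow_none_iff (rows : Nat) (work : List (List String)) (c : Nat) :
    pvFindRow rows work c = none ↔ pvColCnt rows work c = 0 := by
  unfold pvFindRow pvColCnt
  rw [List.find?_eq_none, List.length_eq_zero_iff, List.filter_eq_nil_iff]

lemma pvPassA_spec (rows : Nat) (cs : List Nat) : ∀ (work : List (List String))
    (acc : List Int) (f : Bool), cs.Nodup →
    ∃ W, pvPassA rows cs work acc f =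
        (W, acc ++ (cs.filter (fun c => decide (1 ≤ pvColCnt rows work c))).map (fun c => ((c : Nat) : Int)),
          f || cs.any (fun c => decide (1 ≤ pvColCnt rows work c))) ∧
      ∀ c', pvColCnt rows W c' =
        if c' ∈ cs then pvColCnt rows work c' - 1 else pvColCnt rows work c' := by
  induction cs with
  | nil => intro work acc f _; exact ⟨work, by simp [pvPassA], by simp⟩
  | cons c rest ih =>
    intro work acc f hnd
    rcases List.nodup_cons.mp hnd with ⟨hcr, hndr⟩
    match hfr : pvFindRow rows work c with
    | some r =>
      have hfr' : (List.range rows).find? (fun r => ((work.getD r []).getD c "." != ".")) = some r := hfr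
      have hP : ((work.getD r []).getD c "." != ".") = true := by
        simpa using List.find?_some hfr'
      have hr : r < rows := List.mem_range.mp (List.mem_of_find?_eq_some hfr')
      have hpos : 0 < pvColCnt rows work c := by
        rcases Nat.eq_zero_or_pos (pvColCnt rows work c) with h | h
        · rw [(pvFindRow_none_iff rows work c).mpr h] at hfr; cases hfr
        · exact h
      set work' := work.set r ((work.getD r []).set c ".") with hw'
      have hagree : ∀ x ∈ rest, pvColCnt rows work' x = pvColCnt rows work x := by
        intro x hx
        exact pvColCnt_set_ne rows work c x r (fun e => hcr (e ▸ hx))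
      obtain ⟨W, hEq, hCnt⟩ := ih work' (acc ++ [(c : Int)]) true hndr
      refine ⟨W, ?_, ?_⟩
      · have hfilter : rest.filter (fun x => decide (1 ≤ pvColCnt rows work' x)) =
            rest.filter (fun x => decide (1 ≤ pvColCnt rows work x)) :=
          List.filter_congr (fun x hx => by rw [hagree x hx])
        have h1le : 1 ≤ pvColCnt rows work c := hpos
        simp only [pvPassA, hfr]
        rw [← hw', hEq, hfilter]
        simp [h1le, List.append_assoc]
      · intro c'
        rw [hCnt c']
        by_cases h1 : c' ∈ rest
        · rw [if_pos h1, if_pos (List.mem_cons_of_mem _ h1), hagree c' h1]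
        · by_cases h2 : c' = c
          · subst h2
            rw [if_neg h1, if_pos List.mem_cons_self, hw']
            exact pvColCnt_set_self rows work c' r hr hP
          · rw [if_neg h1, if_neg (by simp [h2, h1]), hw']
            exact pvColCnt_set_ne rows work c c' r h2
    | none =>
      have h0 : pvColCnt rows work c = 0 := (pvFindRow_none_iff rows work c).mp hfr
      obtain ⟨W, hEq, hCnt⟩ := ih work acc f hndr
      refine ⟨W, ?_, ?_⟩
      · rw [pvPassA, hfr, hEq]
        simp [h0]
      · intro c'
        rw [hCnt c']
        by_cases h1 : c' ∈ rest
        · simp [h1, List.mem_cons]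
        · by_cases h2 : c' = c
          · subst h2; simp [h1, h0]
          · simp [h1, h2]

lemma pv_range'_shift (n : Nat) (g : Nat → List Int) :
    (List.range' 1 n).flatMap (fun k => g (k + 1)) = (List.range' 2 n).flatMap g := by
  rw [List.range'_eq_map_range, List.range'_eq_map_range, List.flatMap_map, List.flatMap_map]
  exact List.flatMap_congr (fun x _ => by simp [Nat.add_comm, Nat.add_left_comm])

lemma pvEmitK_congr (cols : Nat) (h h' : Nat → Nat) (k : Nat)
    (hh : ∀ c < cols, h c = h' c) : pvEmitK cols h k = pvEmitK cols h' k := by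
  unfold pvEmitK
  congr 1
  exact List.filter_congr (fun x hx => by rw [hh x (List.mem_range.mp hx)])

lemma pvEmitK_zero (cols : Nat) (h : Nat → Nat) (k : Nat) (hk : 1 ≤ k)
    (hz : ∀ c < cols, h c = 0) : pvEmitK cols h k = [] := by
  unfold pvEmitK
  rw [List.filter_eq_nil_iff.mpr (fun x hx => by
    rw [hz x (List.mem_range.mp hx)]; simpa using by omega)]
  rfl

lemma pvEmitK_shift (cols : Nat) (h : Nat → Nat) (k : Nat) (hk : 1 ≤ k) :
    pvEmitK cols (fun c => h c - 1) k = pvEmitK cols h (k + 1) := by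
  unfold pvEmitK
  congr 1
  exact List.filter_congr (fun x _ => decide_eq_decide.mpr (by beta_reduce; omega))

lemma pvLoopA_spec (rows cols : Nat) (N : Nat) :
    ∀ (fuel : Nat) (work : List (List String)) (acc : List Int),
      (∀ c < cols, pvColCnt rows work c ≤ N) → N < fuel →
      pvLoopA rows cols fuel work acc =
        acc ++ (List.range' 1 N).flatMap (fun k => pvEmitK cols (pvColCnt rows work) k) := by
  induction N with
  | zero =>
    intro fuel work acc hbound hfuel
    obtain ⟨fuel', rfl⟩ : ∃ f', fuel = f' + 1 := ⟨fuel - 1, by omega⟩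
    obtain ⟨W, hEq, _⟩ := pvPassA_spec rows (List.range cols) work acc false List.nodup_range
    have hz : ∀ c ∈ List.range cols, ¬((fun c => decide (1 ≤ pvColCnt rows work c)) c = true) := by
      intro c hc
      have := hbound c (List.mem_range.mp hc)
      simp; omega
    rw [pvLoopA, hEq, List.filter_eq_nil_iff.mpr hz, List.any_eq_false.mpr hz]
    simp
  | succ N ih =>
    intro fuel work acc hbound hfuel
    obtain ⟨fuel', rfl⟩ : ∃ f', fuel = f' + 1 := ⟨fuel - 1, by omega⟩
    obtain ⟨W, hEq, hCnt⟩ := pvPassA_spec rows (List.range cols) work acc false List.nodup_range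
    rw [pvLoopA, hEq]
    by_cases hany : (List.range cols).any (fun c => decide (1 ≤ pvColCnt rows work c)) = true
    · rw [hany]
      simp only [Bool.false_or, if_true]
      have hW : ∀ c < cols, pvColCnt rows W c = pvColCnt rows work c - 1 := by
        intro c hc
        rw [hCnt c, if_pos (List.mem_range.mpr hc)]
      rw [ih fuel' W _ (fun c hc => by rw [hW c hc]; have := hbound c hc; omega) (by omega)]
      have hstep : ∀ k ∈ List.range' 1 N, pvEmitK cols (pvColCnt rows W) k =
          pvEmitK cols (pvColCnt rows work) (k + 1) := by
        intro k hk
        rw [pvEmitK_congr cols _ (fun c => pvColCnt rows work c - 1) k hW,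
          pvEmitK_shift cols _ k (List.mem_range'_1.mp hk).1]
      rw [List.flatMap_congr hstep, pv_range'_shift N (pvEmitK cols (pvColCnt rows work)),
        List.range'_succ, List.flatMap_cons]
      rw [show List.map (fun c => ((c : Nat) : Int)) (List.filter (fun c => decide (1 ≤ pvColCnt rows work c)) (List.range cols)) = pvEmitK cols (pvColCnt rows work) 1 from rfl]
      simp [List.append_assoc]
    · rw [Bool.not_eq_true] at hany
      rw [hany]
      have hz : ∀ c < cols, pvColCnt rows work c = 0 := by
        intro c hc
        have := List.any_eq_false.mp hany c (List.mem_range.mpr hc)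
        simpa using by simpa using this
      have hnil : ∀ k ∈ List.range' 1 (N + 1), pvEmitK cols (pvColCnt rows work) k = [] := by
        intro k hk
        exact pvEmitK_zero cols _ k (List.mem_range'_1.mp hk).1 hz
      rw [List.filter_eq_nil_iff.mpr (fun c hc => by
        have := hz c (List.mem_range.mp hc); simp [this])]
      simp [List.flatMap_eq_nil_iff.mpr hnil]

lemma pv_main (board : List (List String)) (starting_player : String) :
    board_to_moves board starting_player = board_to_moves_alt board starting_player := by
  unfold board_to_moves board_to_moves_alt
  simp only []
  set rows := board.length with hrows
  set cols := (board.headD []).length with hcols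
  set heights : List Nat := (List.range cols).map (fun c =>
      ((List.range rows).filter (fun r => ((board.getD r []).getD c "." != "."))).length) with hh
  have hhc : heights = (List.range cols).map (pvColCnt rows board) := rfl
  -- A side
  have hbound : ∀ c < cols, pvColCnt rows board c ≤ rows := by
    intro c hc
    unfold pvColCnt
    calc ((List.range rows).filter _).length ≤ (List.range rows).length := List.length_filter_le _ _
      _ = rows := List.length_range
  rw [pvLoopA_spec rows cols rows (rows + 1) board [] hbound (by omega)]
  -- B side
  have hinner : ∀ (k : Nat) (res : List Int),
      (List.range cols).foldl (fun res c => if k ≤ heights.getD c 0 then res ++ [(c : Int)] else res) res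
        = res ++ pvEmitK cols (fun c => heights.getD c 0) k := fun k res =>
    PySem.List.foldl_append_ite (fun c => k ≤ heights.getD c 0) (fun c => ((c : Nat) : Int)) _ _
  have houter : (List.range' 1 rows).foldl (fun res k =>
      (List.range cols).foldl (fun res c => if k ≤ heights.getD c 0 then res ++ [(c : Int)] else res) res) []
      = [] ++ (List.range' 1 rows).flatMap (fun k => pvEmitK cols (fun c => heights.getD c 0) k) := by
    rw [PySem.List.foldl_congr_mem (l := List.range' 1 rows)
      (g := fun res k => res ++ pvEmitK cols (fun c => heights.getD c 0) k)
      (h := fun res k _ => hinner k res)]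
    exact PySem.List.foldl_append_eq_flatMap _ _ _
  rw [houter]
  have hcongr : ∀ k ∈ List.range' 1 rows,
      pvEmitK cols (pvColCnt rows board) k = pvEmitK cols (fun c => heights.getD c 0) k := by
    intro k _
    apply pvEmitK_congr
    intro c hc
    rw [hhc, PySem.List.getD_map_range (pvColCnt rows board) cols c 0 hc]
  rw [List.flatMap_congr hcongr]

-- ===== VERDICT (by name: the statement is the Claim_ definition above) =====
theorem board_to_moves_spec : Claim_equal_board_to_moves := by
  intro board starting_player _ _
  unfold Spec_board_to_moves
  exact pv_main board starting_player
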